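-- pv_equiv track=rewrite | github.com/loadingsjy/algorithm | matrix/maxbRroadSize.py | maxbRroadSize
-- ===== SOURCE A (Python) =====
-- def maxbRroadSize(grid):
--     n = len(grid)
--     m = len(grid[0])    # 矩阵的边长
--     max_size = 0
--     max_square = None
--     # 构建后缀连续1的数量矩阵
--     suffix_count = [[0] * m for _ in range(n)]
--     for i in range(n):
--         for j in range(m-1, -1, -1):
--             if grid[i][j] == 1:
--                 suffix_count[i][j] = 1 + suffix_count[i][j+1] if j+1 < m else 1
--     # 构建下缀连续1的数量矩阵
--     prefix_count = [[0] * m for _ in range(n)]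
--     for i in range(n-1, -1, -1):
--         for j in range(m):
--             if grid[i][j] == 1:
--                 prefix_count[i][j] = 1 + prefix_count[i+1][j] if i+1 < n else 1
--     # 验证边界上的值是否都是1
--     for i in range(n-1):
--         for j in range(m-1):
--             if suffix_count[i][j+1] >= n-i-1 and prefix_count[i+1][j] >= m-j-1:
--                 # 计算周长
--                 size = (n-i-1) * (m-j-1)
--                 if size > max_size:
--                     max_size = size
--                     max_square = (i, j)
--     return max_size, max_square
-- ===== SOURCE B (Python) =====
-- def maxbRroadSize(grid):
--     n = len(grid)
--     m = len(grid[0])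
--
--     def border_ok(i, j):
--         h = n - i - 1   # horizontal run required in row i right of column j
--         v = m - j - 1   # vertical run required in column j below row i
--         return (j + h < m and i + v < n
--                 and all(x == 1 for x in grid[i][j + 1:j + 1 + h])
--                 and all(row[j] == 1 for row in grid[i + 1:i + 1 + v]))
--
--     candidates = [((n - i - 1) * (m - j - 1), (i, j))
--                   for i in range(n - 1) for j in range(m - 1) if border_ok(i, j)]
--     best_size, best_cell = 0, None
--     for size, cell in candidates:
--         if size > best_size:
--             best_size, best_cell = size, cell
--     return best_size, best_cell
-- ===== Notes on version B (the rewrite author's own statement) =====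
-- stated objective: simpler
-- what changed: B drops A's suffix_count/prefix_count run-length tables entirely: a border_ok(i,j) predicate checks the required right-run and down-run directly with a bounds test plus all(==1) over two slices, a list comprehension collects the valid (size, cell) candidates, and a final strict-> scan picks the maximum; same row-major order and tie-breaking.
-- outside the precondition, e.g. on maxbRroadSize([]): A raises IndexError, B raises IndexError; on maxbRroadSize([[1, 1], [1]]): A raises IndexError, B returns (1, (0, 0))
import Mathlib
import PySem

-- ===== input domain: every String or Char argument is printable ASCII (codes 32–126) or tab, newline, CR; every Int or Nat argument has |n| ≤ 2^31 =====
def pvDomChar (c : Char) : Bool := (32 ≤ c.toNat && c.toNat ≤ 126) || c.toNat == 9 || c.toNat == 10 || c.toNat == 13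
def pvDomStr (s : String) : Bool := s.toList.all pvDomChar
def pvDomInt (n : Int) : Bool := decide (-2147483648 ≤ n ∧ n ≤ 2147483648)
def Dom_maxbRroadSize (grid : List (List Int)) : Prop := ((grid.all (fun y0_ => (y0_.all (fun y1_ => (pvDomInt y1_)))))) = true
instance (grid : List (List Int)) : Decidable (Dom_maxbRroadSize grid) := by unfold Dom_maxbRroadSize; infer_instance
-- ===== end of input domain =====

-- B drops A's two run-length tables: it checks each candidate border directly with a
-- bounds test plus all-ones tests on two slices, gathers the valid candidates in a
-- (size, cell) list, and picks the maximum by a final strict-> scan (simpler, no tables).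

-- ===== PORT A =====
-- A's right-to-left in-place fill of one suffix_count row, as structural recursion
-- computing the same cells in the same order (s = cells j+1..m-1).
def sfxRow : List Int → List Int
  | [] => []
  | x :: rest =>
      let s := sfxRow rest
      (if x == 1 then (if s.isEmpty then 1 else 1 + s.headD 0) else 0) :: s

-- A's bottom-to-top fill of prefix_count, row by row (p = rows i+1..n-1);
-- grid[i][j] for j in range(m) read via (r.take m) — exact under Pre_ (rows have ≥ m cells).
def pfxRows (m : Nat) : List (List Int) → List (List Int)
  | [] => []
  | r :: rest =>
      let p := pfxRows m rest
      (match p with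
       | [] => (r.take m).map (fun x => if x == 1 then (1 : Int) else 0)
       | p0 :: _ => List.zipWith (fun x y => if x == 1 then 1 + y else 0) (r.take m) p0) :: p

-- Match on grid only to make grid[0] total: A raises IndexError on []; excluded by Pre_.
def maxbRroadSize (grid : List (List Int)) : Int × (Option (Int × Int)) :=
  match grid with
  | [] => (0, none)
  | r0 :: _ =>
      let n := grid.length
      let m := r0.length
      let suffix := grid.map (fun r => sfxRow (r.take m))
      let pref := pfxRows m grid
      (List.range (n - 1)).foldl (fun st i =>
        (List.range (m - 1)).foldl (fun st j =>
          if ((n : Int) - i - 1) ≤ ((suffix.getD i []).getD (j + 1) 0) ∧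
             ((m : Int) - j - 1) ≤ ((pref.getD (i + 1) []).getD j 0) then
            let size := ((n : Int) - i - 1) * ((m : Int) - j - 1)
            if st.1 < size then (size, some ((i : Int), (j : Int))) else st
          else st) st) ((0 : Int), (none : Option (Int × Int)))

-- ===== PORT B =====
-- Source B's border_ok(i, j): bounds test, then all(==1) over the row slice
-- grid[i][j+1 : j+1+h] and over the j-th cells of the row slice grid[i+1 : i+1+v];
-- grid[i] ported as getD (i < n-1 is always in range), row[j] as getD (j < m ≤ row length under Pre_).
def borderOk (grid : List (List Int)) (n m i j : Nat) : Bool :=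
  let h := n - i - 1
  let v := m - j - 1
  decide (j + h < m) && decide (i + v < n) &&
  (PySem.List.slice (grid.getD i []) (some ((j : Int) + 1)) (some (((j : Int) + 1) + (h : Int)))).all
    (fun x => x == 1) &&
  (PySem.List.slice grid (some ((i : Int) + 1)) (some (((i : Int) + 1) + (v : Int)))).all
    (fun row => row.getD j 0 == 1)

def maxbRroadSize_alt (grid : List (List Int)) : Int × (Option (Int × Int)) :=
  match grid with
  | [] => (0, none)   -- Source B also raises IndexError here; excluded by Pre_
  | r0 :: _ =>
      let n := grid.length
      let m := r0.length
      -- the list comprehension: candidates = [(size, (i,j)) for i … for j … if border_ok(i,j)]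
      let candidates :=
        (List.range (n - 1)).flatMap (fun i =>
          ((List.range (m - 1)).filter (fun j => borderOk grid n m i j)).map (fun (j : Nat) =>
            (((n : Int) - i - 1) * ((m : Int) - j - 1), ((i : Int), (j : Int)))))
      -- the final strict-> maximum scan
      candidates.foldl
        (fun best c => if best.1 < c.1 then (c.1, some c.2) else best)
        ((0 : Int), (none : Option (Int × Int)))

-- ===== PRECONDITION & SPEC =====
-- Pre_ excludes exactly the inputs where A raises IndexError: the empty grid (grid[0])
-- and ragged grids with a row shorter than the first row (grid[i][j] for j < m).
def Pre_maxbRroadSize (grid : List (List Int)) : Prop :=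
  grid ≠ [] ∧ ∀ r ∈ grid, (grid.headD []).length ≤ r.length
instance (grid : List (List Int)) : Decidable (Pre_maxbRroadSize grid) := by
  unfold Pre_maxbRroadSize; infer_instance
def pvWitness_maxbRroadSize : List (List Int) := [[1, 1, 1], [1, 0, 1], [1, 1, 1]]

def Spec_maxbRroadSize (grid : List (List Int)) (out : Int × (Option (Int × Int))) : Prop := out = maxbRroadSize_alt grid
instance (grid : List (List Int)) (out : Int × (Option (Int × Int))) : Decidable (Spec_maxbRroadSize grid out) := by unfold Spec_maxbRroadSize; infer_instance

-- ===== CLAIM (what is proved, stated in full; the proofs are below) =====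
def Claim_equal_maxbRroadSize : Prop := ∀ (grid : List (List Int)), Dom_maxbRroadSize grid → Pre_maxbRroadSize grid → Spec_maxbRroadSize grid (maxbRroadSize grid)

-- ===== LEMMAS AND PROOFS =====

-- proof-side run-length counter: cnt p xs = length of the maximal all-p prefix of xs
def cnt {α : Type} (p : α → Bool) : List α → Int
  | [] => 0
  | x :: rest => if p x then 1 + cnt p rest else 0

theorem cnt_nonneg {α : Type} (p : α → Bool) (xs : List α) : 0 ≤ cnt p xs := by
  induction xs with
  | nil => simp [cnt]
  | cons x t ih => by_cases h : p x <;> simp [cnt, h] <;> omega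

-- the key characterisation: a run of length ≥ c means the first c elements exist and all satisfy p
theorem cnt_ge_iff {α : Type} (p : α → Bool) (c : Nat) (xs : List α) :
    ((c : Int) ≤ cnt p xs) ↔ ((xs.take c).all p = true ∧ c ≤ xs.length) := by
  induction c generalizing xs with
  | zero => simpa using cnt_nonneg p xs
  | succ c' ih =>
    cases xs with
    | nil => simp [cnt]
    | cons x t =>
      by_cases h : p x
      · have : ((c' : Int) + 1 ≤ 1 + cnt p t) ↔ ((c' : Int) ≤ cnt p t) := by omega
        simp [cnt, h, List.take_succ_cons, this, ih, Nat.succ_le_succ_iff]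
      · have h0 : ¬ ((c' : Int) + 1 ≤ 0) := by omega
        simp [cnt, h, h0]

theorem sfxRow_getD (r : List Int) (k : Nat) :
    (sfxRow r).getD k 0 = cnt (fun x => x == 1) (r.drop k) := by
  induction r generalizing k with
  | nil => simp [sfxRow, cnt]
  | cons x rest ih =>
    cases k with
    | zero =>
      cases rest with
      | nil => simp [sfxRow, cnt]
      | cons y t =>
        have h0 := ih 0
        simp [sfxRow, cnt] at h0 ⊢
        split_ifs <;> simp_all
    | succ k' => simpa [sfxRow, cnt] using ih k'

theorem suffix_cell (g : List (List Int)) (m : Nat) (i k : Nat) :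
    ((g.map (fun r => sfxRow (r.take m))).getD i []).getD k 0
      = cnt (fun x => x == 1) (((g.getD i []).take m).drop k) := by
  have hrow : (g.map (fun r => sfxRow (r.take m))).getD i [] = sfxRow ((g.getD i []).take m) := by
    by_cases h : i < g.length
    · rw [List.getD_eq_getElem?_getD, List.getElem?_map, List.getElem?_eq_getElem h,
          List.getD_eq_getElem?_getD, List.getElem?_eq_getElem h]
      simp
    · rw [List.getD_eq_default _ _ (by simpa using Nat.le_of_not_lt h),
          List.getD_eq_default _ _ (Nat.le_of_not_lt h)]
      simp [sfxRow]
  rw [hrow, sfxRow_getD]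

theorem pfxRows_length (m : Nat) (g : List (List Int))
    (hg : ∀ r ∈ g, m ≤ r.length) :
    ∀ row ∈ pfxRows m g, row.length = m := by
  induction g with
  | nil => simp [pfxRows]
  | cons r rest ih =>
    have hr : m ≤ r.length := hg r (by simp)
    have hrest : ∀ x ∈ rest, m ≤ x.length := fun x hx => hg x (by simp [hx])
    intro row hrow
    cases hp : pfxRows m rest with
    | nil =>
      simp [pfxRows, hp] at hrow
      simp [hrow, List.length_take, Nat.min_eq_left hr]
    | cons p0 ptail =>
      have hp0 : p0.length = m := ih hrest p0 (by simp [hp])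
      simp [pfxRows, hp] at hrow
      rcases hrow with h | h
      · simp [h, List.length_zipWith, List.length_take, Nat.min_eq_left hr, hp0]
      · exact ih hrest row (by simp [hp, h])

theorem prefix_cell (m : Nat) (g : List (List Int))
    (hg : ∀ r ∈ g, m ≤ r.length) (j : Nat) (hj : j < m) :
    ∀ i, ((pfxRows m g).getD i []).getD j 0
      = cnt (fun row => row.getD j 0 == 1) (g.drop i) := by
  induction g with
  | nil => intro i; simp [pfxRows, cnt]
  | cons r rest ih =>
    have hr : m ≤ r.length := hg r (by simp)
    have hrest : ∀ x ∈ rest, m ≤ x.length := fun x hx => hg x (by simp [hx])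
    intro i
    cases i with
    | succ i' =>
      have := ih hrest i'
      simpa [pfxRows] using this
    | zero =>
      have hjr : j < r.length := Nat.lt_of_lt_of_le hj hr
      have hjtake : j < (r.take m).length := by
        simpa [List.length_take, Nat.min_eq_left hr] using hj
      have htake : (r.take m)[j] = r.getD j 0 := by
        rw [List.getElem_take, List.getD_eq_getElem?_getD, List.getElem?_eq_getElem hjr]
        rfl
      cases hp : pfxRows m rest with
      | nil =>
        have hrest0 : rest = [] := by
          cases rest with
          | nil => rfl
          | cons a b => simp [pfxRows] at hp
        subst hrest0
        rw [show pfxRows m [r] = [(r.take m).map (fun x => if x == 1 then (1:Int) else 0)] from rfl]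
        rw [List.getD_cons_zero, List.getD_eq_getElem?_getD, List.getElem?_map,
            List.getElem?_eq_getElem hjtake]
        simp only [Option.map_some, Option.getD_some, htake]
        by_cases hx : r.getD j 0 = 1 <;> simp [cnt, hx]
      | cons p0 ptail =>
        have hp0 : p0.length = m := pfxRows_length m rest hrest p0 (by simp [hp])
        have hjp0 : j < p0.length := by omega
        have hjz : j < (List.zipWith (fun x y => if x == 1 then (1:Int) + y else 0) (r.take m) p0).length := by
          simp [List.length_zipWith, List.length_take, Nat.min_eq_left hr, hp0, hj]
        have hrec : p0.getD j 0 = cnt (fun row => row.getD j 0 == 1) rest := by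
          have := ih hrest 0
          simpa [hp] using this
        have hp0j : p0[j] = cnt (fun row => row.getD j 0 == 1) rest := by
          rw [← hrec, List.getD_eq_getElem?_getD, List.getElem?_eq_getElem hjp0]; rfl
        rw [show pfxRows m (r :: rest)
              = (List.zipWith (fun x y => if x == 1 then (1:Int) + y else 0) (r.take m) p0) :: pfxRows m rest by
            simp [pfxRows, hp]]
        rw [List.getD_cons_zero, List.getD_eq_getElem?_getD, List.getElem?_eq_getElem hjz]
        simp only [List.getElem_zipWith, Option.getD_some, htake, hp0j]
        by_cases hx : r.getD j 0 = 1 <;> simp [cnt, hx]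

-- A's table condition at (i,j) is exactly B's borderOk test
theorem cond_iff (grid : List (List Int)) (r0 : List Int) (rest : List (List Int))
    (hg : grid = r0 :: rest) (hlen : ∀ r ∈ grid, r0.length ≤ r.length)
    (i j : Nat) (hi : i < grid.length - 1) (hj : j < r0.length - 1) :
    ((((grid.length : Int) - i - 1) ≤
        (((grid.map (fun r => sfxRow (r.take r0.length))).getD i []).getD (j + 1) 0) ∧
      ((r0.length : Int) - j - 1) ≤
        (((pfxRows r0.length grid).getD (i + 1) []).getD j 0))
      ↔ borderOk grid grid.length r0.length i j = true) := by
  set n := grid.length with hn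
  set m := r0.length with hm
  have hjm : j < m := by omega
  have him : i < n := by omega
  have hrowlen : m ≤ (grid.getD i []).length := by
    apply hlen
    have : i < grid.length := him
    rw [List.getD_eq_getElem?_getD, List.getElem?_eq_getElem this]
    exact List.getElem_mem this
  have hs := suffix_cell grid m i (j + 1)
  have hp := prefix_cell m grid (fun r hr => hlen r hr) j hjm (i + 1)
  rw [hs, hp]
  -- rewrite the two slices into drop/take form
  have hslice1 : PySem.List.slice (grid.getD i []) (some ((j : Int) + 1))
      (some (((j : Int) + 1) + ((n - i - 1 : Nat) : Int)))
      = ((grid.getD i []).drop (j + 1)).take (n - i - 1) := by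
    have := PySem.List.slice_natCast_add (xs := grid.getD i []) (j := j + 1) (n := n - i - 1)
    simpa [Int.natCast_add] using this
  have hslice2 : PySem.List.slice grid (some ((i : Int) + 1))
      (some (((i : Int) + 1) + ((m - j - 1 : Nat) : Int)))
      = (grid.drop (i + 1)).take (m - j - 1) := by
    have := PySem.List.slice_natCast_add (xs := grid) (j := i + 1) (n := m - j - 1)
    simpa [Int.natCast_add] using this
  unfold borderOk
  simp only [hslice1, hslice2, Bool.and_eq_true, decide_eq_true_eq]
  -- number casts: (n:Int)-i-1 = ((n-i-1 : Nat) : Int), etc.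
  have hcast1 : ((n : Int) - i - 1) = ((n - i - 1 : Nat) : Int) := by omega
  have hcast2 : ((m : Int) - j - 1) = ((m - j - 1 : Nat) : Int) := by omega
  rw [hcast1, hcast2,
      cnt_ge_iff (fun x => x == 1) (n - i - 1) (((grid.getD i []).take m).drop (j + 1)),
      cnt_ge_iff (fun row => row.getD j 0 == 1) (m - j - 1) (grid.drop (i + 1))]
  have hlen1 : (((grid.getD i []).take m).drop (j + 1)).length = m - (j + 1) := by
    simp only [List.length_drop, List.length_take]
    omega
  have hlen2 : (grid.drop (i + 1)).length = n - (i + 1) := by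
    simp only [List.length_drop]
    omega
  constructor
  · rintro ⟨⟨ha1, hl1⟩, ⟨ha2, hl2⟩⟩
    rw [hlen1] at hl1; rw [hlen2] at hl2
    have hb1 : j + (n - i - 1) < m := by omega
    have hb2 : i + (m - j - 1) < n := by omega
    refine ⟨⟨⟨hb1, hb2⟩, ?_⟩, ?_⟩
    · -- row slice all-ones: ((row.drop (j+1)).take h) = ((row.take m).drop (j+1)).take h
      have : ((grid.getD i []).drop (j + 1)).take (n - i - 1)
          = (((grid.getD i []).take m).drop (j + 1)).take (n - i - 1) := by
        rw [List.drop_take]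
        rw [List.take_take]
        congr 1
        omega
      rw [this]
      exact ha1
    · -- column slice: take (m-j-1) of grid.drop (i+1)
      exact ha2
  · rintro ⟨⟨⟨hb1, hb2⟩, ha1⟩, ha2⟩
    have hl1 : n - i - 1 ≤ (((grid.getD i []).take m).drop (j + 1)).length := by
      rw [hlen1]; omega
    have hl2 : m - j - 1 ≤ (grid.drop (i + 1)).length := by
      rw [hlen2]; omega
    refine ⟨⟨?_, hl1⟩, ⟨ha2, hl2⟩⟩
    have : ((grid.getD i []).drop (j + 1)).take (n - i - 1)
        = (((grid.getD i []).take m).drop (j + 1)).take (n - i - 1) := by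
      rw [List.drop_take, List.take_take]
      congr 1
      omega
    rw [← this]
    exact ha1

-- fold over (l.filter p).map f  =  fold over l guarded by p (the comprehension's shape)
theorem foldl_filter_map_if {α β γ : Type} (l : List α) (p : α → Bool) (f : α → γ)
    (upd : β → γ → β) (st : β) :
    ((l.filter p).map f).foldl upd st
      = l.foldl (fun st x => if p x then upd st (f x) else st) st := by
  induction l generalizing st with
  | nil => rfl
  | cons x t ih =>
    by_cases h : p x
    · simp [List.filter_cons, h, ih]
    · simp [List.filter_cons, h, ih]

-- ===== VERDICT (by name: the statement is the Claim_ definition above) =====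
theorem maxbRroadSize_spec : Claim_equal_maxbRroadSize := by
  intro grid _ hpre
  unfold Spec_maxbRroadSize
  obtain ⟨hne, hlen⟩ := hpre
  cases hg : grid with
  | nil => exact absurd hg hne
  | cons r0 rest =>
    subst hg
    have hlen' : ∀ r ∈ (r0 :: rest), r0.length ≤ r.length := by
      intro r hr; simpa using hlen r hr
    unfold maxbRroadSize maxbRroadSize_alt
    simp only []
    rw [List.foldl_flatMap]
    apply PySem.List.foldl_congr_mem
    intro st i hi
    rw [foldl_filter_map_if]
    apply PySem.List.foldl_congr_mem
    intro st' j hj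
    have hi' : i < (r0 :: rest).length - 1 := List.mem_range.mp hi
    have hj' : j < r0.length - 1 := List.mem_range.mp hj
    have hiff := cond_iff (r0 :: rest) r0 rest rfl hlen' i j hi' hj'
    by_cases hc : borderOk (r0 :: rest) (r0 :: rest).length r0.length i j = true
    · rw [if_pos (hiff.mpr hc), if_pos hc]
    · rw [if_neg (fun h => hc (hiff.mp h)), if_neg hc]
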